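-- pv_equiv track=rewrite | github.com/Minazuki02/Fin-5.4-data | utils/splitter.py | summarize_original_splits
-- ===== SOURCE A (Python) =====
-- from collections import Counter
-- from typing import Any
--
-- TRAIN_SPLIT_NAMES = {"train", "training"}
--
-- VAL_SPLIT_NAMES = {"val", "dev", "valid", "validation", "eval"}
--
-- TEST_SPLIT_NAMES = {"test", "test_gold"}
--
-- def canonicalize_split_name(raw_split: Any) -> str:
--     text = str(raw_split or "").strip().lower()
--     if text in TRAIN_SPLIT_NAMES:
--         return "train"
--     if text in VAL_SPLIT_NAMES:
--         return "val"
--     if text in TEST_SPLIT_NAMES: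
--         return "test"
--     return ""
--
-- def extract_raw_split(record: dict[str, Any]) -> str:
--     metadata = record.get("metadata", {})
--     if not isinstance(metadata, dict):
--         return ""
--     return str(metadata.get("raw_split", "") or "").strip()
--
-- def summarize_original_splits(records: list[dict[str, Any]]) -> tuple[dict[str, int], dict[str, int]]:
--     raw_counter: Counter[str] = Counter()
--     canonical_counter: Counter[str] = Counter()
--
--     for record in records:
--         raw_split = extract_raw_split(record)
--         canonical_split = canonicalize_split_name(raw_split)
--         raw_counter.update([raw_split or "__missing__"])
--         canonical_counter.update([canonical_split or "__missing__"])
--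
--     return dict(raw_counter), dict(canonical_counter)
-- ===== SOURCE B (Python) =====
-- TRAIN_SPLIT_NAMES = {"train", "training"}
-- VAL_SPLIT_NAMES = {"val", "dev", "valid", "validation", "eval"}
-- TEST_SPLIT_NAMES = {"test", "test_gold"}
--
--
-- def canonicalize_split_name(raw_split):
--     text = str(raw_split or "").strip().lower()
--     if text in TRAIN_SPLIT_NAMES:
--         return "train"
--     if text in VAL_SPLIT_NAMES:
--         return "val"
--     if text in TEST_SPLIT_NAMES:
--         return "test"
--     return ""
--
--
-- def extract_raw_split(record):
--     metadata = record.get("metadata", {})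
--     if not isinstance(metadata, dict):
--         return ""
--     return str(metadata.get("raw_split", "") or "").strip()
--
--
-- def summarize_original_splits(records):
--     # One counting pass over records, then derive the canonical totals from the
--     # aggregated raw counter instead of canonicalizing every record.
--     raw_counter = {}
--     for record in records:
--         key = extract_raw_split(record) or "__missing__"
--         raw_counter[key] = raw_counter.get(key, 0) + 1
--     canonical_counter = {}
--     for key, count in raw_counter.items():
--         ckey = canonicalize_split_name(key) or "__missing__"
--         canonical_counter[ckey] = canonical_counter.get(ckey, 0) + count
--     return raw_counter, canonical_counter
-- ===== Notes on version B (the rewrite author's own statement) =====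
-- stated objective: alternative
-- what changed: B counts only the raw split names in its pass over records and then derives the canonical counter by a second, differently-shaped pass that canonicalizes each DISTINCT raw key once and adds its aggregated count, instead of canonicalizing every record individually.
import Mathlib
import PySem

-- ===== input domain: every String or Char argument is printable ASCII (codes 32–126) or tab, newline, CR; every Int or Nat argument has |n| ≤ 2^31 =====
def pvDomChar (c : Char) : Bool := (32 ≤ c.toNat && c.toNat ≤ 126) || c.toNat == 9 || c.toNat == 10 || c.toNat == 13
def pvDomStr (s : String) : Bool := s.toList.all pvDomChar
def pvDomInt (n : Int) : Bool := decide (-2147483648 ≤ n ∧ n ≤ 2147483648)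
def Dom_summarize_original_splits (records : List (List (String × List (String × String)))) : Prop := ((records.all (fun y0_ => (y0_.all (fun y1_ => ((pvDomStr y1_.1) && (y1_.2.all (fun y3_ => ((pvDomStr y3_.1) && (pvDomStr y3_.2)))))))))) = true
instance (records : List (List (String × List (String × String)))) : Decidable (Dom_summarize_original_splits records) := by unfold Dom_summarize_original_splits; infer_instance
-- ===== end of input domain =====

-- ===== PORT A =====
-- B derives the canonical counts by a second pass over the aggregated raw counter
-- instead of canonicalizing every record (objective: alternative decomposition).

-- str(raw or "") for a string raw is raw itself ("" stays ""), so it is ported as the identity.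
def pvCanonicalizeSplitName (raw_split : String) : String :=
  let text := PySem.Str.lower (PySem.Str.strip raw_split)
  if PySem.Set.contains ["train", "training"] text then "train"
  else if PySem.Set.contains ["val", "dev", "valid", "validation", "eval"] text then "val"
  else if PySem.Set.contains ["test", "test_gold"] text then "test"
  else ""

-- metadata is always a dict under the type convention, so the isinstance branch never fires.
def pvExtractRawSplit (record : List (String × List (String × String))) : String :=
  let metadata := (PySem.Dict.mk record).getD "metadata" []
  PySem.Str.strip ((PySem.Dict.mk metadata).getD "raw_split" "")

-- s or "__missing__"
def pvOrMissing (s : String) : String := if s = "" then "__missing__" else s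

def summarize_original_splits (records : List (List (String × List (String × String)))) : (List (String × Int)) × (List (String × Int)) :=
  let p := records.foldl
    (fun (st : PySem.Dict String Int × PySem.Dict String Int) record =>
      let raw_split := pvExtractRawSplit record
      let canonical_split := pvCanonicalizeSplitName raw_split
      (st.1.modify (pvOrMissing raw_split) 0 (· + 1),
       st.2.modify (pvOrMissing canonical_split) 0 (· + 1)))
    (PySem.Dict.empty, PySem.Dict.empty)
  (p.1.items, p.2.items)

-- ===== PORT B =====
def summarize_original_splits_alt (records : List (List (String × List (String × String)))) : (List (String × Int)) × (List (String × Int)) :=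
  let raw_counter := records.foldl
    (fun (d : PySem.Dict String Int) record =>
      let key := pvOrMissing (pvExtractRawSplit record)
      d.insert key (d.getD key 0 + 1))
    PySem.Dict.empty
  let canonical_counter := raw_counter.items.foldl
    (fun (c : PySem.Dict String Int) kv =>
      let ckey := pvOrMissing (pvCanonicalizeSplitName kv.1)
      c.insert ckey (c.getD ckey 0 + kv.2))
    PySem.Dict.empty
  (raw_counter.items, canonical_counter.items)

-- ===== PRECONDITION & SPEC =====
def Spec_summarize_original_splits (records : List (List (String × List (String × String)))) (out : (List (String × Int)) × (List (String × Int))) : Prop := out = summarize_original_splits_alt records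
instance (records : List (List (String × List (String × String)))) (out : (List (String × Int)) × (List (String × Int))) : Decidable (Spec_summarize_original_splits records out) := by unfold Spec_summarize_original_splits; infer_instance

-- ===== CLAIM (what is proved, stated in full; the proofs are below) =====
def Claim_equal_summarize_original_splits : Prop := ∀ (records : List (List (String × List (String × String)))), Dom_summarize_original_splits records → Spec_summarize_original_splits records (summarize_original_splits records)

-- ===== LEMMAS AND PROOFS =====

-- the canonical key of a record equals pvF of its raw key (pvCanonicalizeSplitName maps both "" and "__missing__" to "")
def pvF (k : String) : String := pvOrMissing (pvCanonicalizeSplitName k)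

-- B's second-pass accumulation step, with the per-key amount abstracted as cnt
def pvStep (cnt : String → Int) (c : PySem.Dict String Int) (k : String) : PySem.Dict String Int :=
  c.insert (pvF k) (c.getD (pvF k) 0 + cnt k)

-- bump = "counter update by one at key κ"
def pvBump (d : PySem.Dict String Int) (κ : String) : PySem.Dict String Int :=
  d.modify κ 0 (· + 1)

theorem pvF_orMissing (raw : String) :
    pvOrMissing (pvCanonicalizeSplitName raw) = pvF (pvOrMissing raw) := by
  by_cases h : raw = ""
  · subst h; decide
  · simp [pvOrMissing, h, pvF]

theorem pv_insert_insert_comm {d : PySem.Dict String Int} {κ κ' : String} (a b : Int)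
    (hc : d.contains κ = true) (hne : κ ≠ κ') :
    (d.insert κ a).insert κ' b = (d.insert κ' b).insert κ a := by
  have hne' : κ' ≠ κ := Ne.symm hne
  by_cases hc' : d.contains κ' = true
  · apply PySem.Dict.ext
    rw [PySem.Dict.items_insert_of_contains _ b (by simp [PySem.Dict.contains_insert, hc'])]
    rw [PySem.Dict.items_insert_of_contains _ a hc]
    rw [PySem.Dict.items_insert_of_contains _ a (by simp [PySem.Dict.contains_insert, hc])]
    rw [PySem.Dict.items_insert_of_contains _ b hc']
    simp only [List.map_map]
    apply List.map_congr_left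
    intro p _
    by_cases h1 : p.1 = κ <;> by_cases h2 : p.1 = κ' <;>
      simp_all [Function.comp, beq_iff_eq]
  · have hcf : d.contains κ' = false := by simpa using hc'
    apply PySem.Dict.ext
    have hcb : (d.insert κ' b).contains κ = true := by
      simp [PySem.Dict.contains_insert, hc]
    rw [PySem.Dict.items_insert_of_not_contains _ b
          (by simp [PySem.Dict.contains_insert, hcf, hne'])]
    rw [PySem.Dict.items_insert_of_contains _ a hc]
    rw [PySem.Dict.items_insert_of_contains _ a hcb]
    rw [PySem.Dict.items_insert_of_not_contains _ b hcf]
    rw [List.map_append]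
    simp [beq_iff_eq, hne']

-- a pending +1 at a key already present commutes past the whole accumulation loop
theorem pv_foldl_bump (L : List String) (cnt : String → Int) (d : PySem.Dict String Int)
    (κ : String) (hκ : d.contains κ = true) :
    L.foldl (pvStep cnt) (pvBump d κ) = pvBump (L.foldl (pvStep cnt) d) κ := by
  induction L generalizing d with
  | nil => rfl
  | cons k L ih =>
    have hcontains : (pvStep cnt d k).contains κ = true := by
      simp [pvStep, PySem.Dict.contains_insert, hκ]
    have hcomm : pvStep cnt (pvBump d κ) k = pvBump (pvStep cnt d k) κ := by
      by_cases h : pvF k = κ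
      · subst h
        simp only [pvStep, pvBump, PySem.Dict.modify, PySem.Dict.getD_insert_self,
          PySem.Dict.insert_insert_self]
        ring_nf
      · have h' : κ ≠ pvF k := Ne.symm h
        simp only [pvStep, pvBump, PySem.Dict.modify]
        rw [PySem.Dict.getD_insert_of_ne _ _ _ h, PySem.Dict.getD_insert_of_ne _ _ _ h']
        exact pv_insert_insert_comm _ _ hκ h'
    rw [List.foldl_cons, hcomm, List.foldl_cons, ih _ hcontains]

-- raising the amount of one member of a Nodup key list by one bumps the aggregate at pvF of it
theorem pv_foldl_cnt_succ (L : List String) (d : PySem.Dict String Int)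
    (cnt cnt' : String → Int) (x : String) (hx : x ∈ L) (hnd : L.Nodup)
    (hagree : ∀ k ∈ L, k ≠ x → cnt' k = cnt k) (hsucc : cnt' x = cnt x + 1) :
    L.foldl (pvStep cnt') d = pvBump (L.foldl (pvStep cnt) d) (pvF x) := by
  induction L generalizing d with
  | nil => cases hx
  | cons k L ih =>
    by_cases hk : k = x
    · subst hk
      have hknotin : k ∉ L := (List.nodup_cons.mp hnd).1
      have hstep : pvStep cnt' d k = pvBump (pvStep cnt d k) (pvF k) := by
        simp only [pvStep, pvBump, PySem.Dict.modify, PySem.Dict.getD_insert_self,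
          PySem.Dict.insert_insert_self, hsucc]
        ring_nf
      rw [List.foldl_cons, hstep, List.foldl_cons]
      rw [PySem.List.foldl_congr_mem L (pvStep cnt') (pvStep cnt)
        (pvBump (pvStep cnt d k) (pvF k))
        (fun acc y hy => by
          have hyx : y ≠ k := fun h => hknotin (h ▸ hy)
          simp only [pvStep, hagree y (List.mem_cons_of_mem _ hy) hyx])]
      exact pv_foldl_bump L cnt _ (pvF k) (by simp [pvStep])
    · have hxL : x ∈ L := by cases hx with | head => exact absurd rfl hk | tail _ h => exact h
      rw [List.foldl_cons, List.foldl_cons]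
      rw [show pvStep cnt' d k = pvStep cnt d k by
        simp only [pvStep, hagree k List.mem_cons_self hk]]
      exact ih _ hxL (List.nodup_cons.mp hnd).2
        (fun y hy => hagree y (List.mem_cons_of_mem _ hy))

-- the crux: aggregating (distinct raw key, its count) pairs through pvF counts the pvF-image list
theorem pv_aggregate_counter (ks : List String) :
    (PySem.Set.ofList ks).foldl (pvStep (fun k => (ks.count k : Int))) PySem.Dict.empty
      = PySem.Dict.counter (ks.map pvF) := by
  induction ks using List.reverseRecOn with
  | nil => simp [PySem.Dict.counter]
  | append_singleton ks x ih =>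
    have hcnt : ∀ k, (((ks ++ [x]).count k : Nat) : Int)
        = (ks.count k : Int) + (if k = x then 1 else 0) := by
      intro k
      by_cases h : k = x <;> simp [List.count_append, List.count_eq_zero, h]
    rw [show (ks ++ [x]).map pvF = ks.map pvF ++ [pvF x] by simp,
      PySem.Dict.counter_append_singleton, PySem.Set.ofList_append_singleton]
    by_cases hx : x ∈ ks
    · rw [PySem.Set.add_of_mem (by rw [PySem.Set.mem_ofList]; exact hx)]
      rw [pv_foldl_cnt_succ _ _ (fun k => (ks.count k : Int)) _ x
        (by rw [PySem.Set.mem_ofList]; exact hx) (PySem.Set.nodup_ofList ks)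
        (fun k _ hk => by rw [hcnt k]; simp [hk]) (by rw [hcnt x]; simp)]
      rw [ih]
      simp only [pvBump]
    · rw [PySem.Set.add_of_not_mem (by rw [PySem.Set.mem_ofList]; exact hx)]
      rw [List.foldl_append]
      rw [PySem.List.foldl_congr_mem (PySem.Set.ofList ks)
        (pvStep (fun k => ((ks ++ [x]).count k : Int)))
        (pvStep (fun k => (ks.count k : Int))) PySem.Dict.empty
        (fun acc y hy => by
          have hy' : y ∈ ks := (PySem.Set.mem_ofList _ _).mp hy
          have hne : y ≠ x := fun h => hx (h ▸ hy')
          simp only [pvStep, hcnt y, hne, if_false, add_zero])]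
      rw [ih]
      simp only [List.foldl_cons, List.foldl_nil, pvStep, hcnt x,
        List.count_eq_zero_of_not_mem hx]
      norm_num
      simp [PySem.Dict.modify, PySem.Dict.getD_counter]

-- A's interleaved fold, split and rewritten as two counters
theorem pvA_eq (records : List (List (String × List (String × String)))) :
    summarize_original_splits records =
      ((PySem.Dict.counter (records.map (fun r => pvOrMissing (pvExtractRawSplit r)))).items,
       (PySem.Dict.counter ((records.map (fun r => pvOrMissing (pvExtractRawSplit r))).map pvF)).items) := by
  have hsplit := PySem.List.foldl_prod_mk
    (fun (d : PySem.Dict String Int) record => d.modify (pvOrMissing (pvExtractRawSplit record)) 0 (· + 1))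
    (fun (d : PySem.Dict String Int) record => d.modify (pvOrMissing (pvCanonicalizeSplitName (pvExtractRawSplit record))) 0 (· + 1))
    records PySem.Dict.empty PySem.Dict.empty
  have h1 : records.foldl
      (fun (d : PySem.Dict String Int) record => d.modify (pvOrMissing (pvExtractRawSplit record)) 0 (· + 1))
      PySem.Dict.empty
      = PySem.Dict.counter (records.map (fun r => pvOrMissing (pvExtractRawSplit r))) :=
    (List.foldl_map (f := fun r => pvOrMissing (pvExtractRawSplit r))
      (g := fun (d : PySem.Dict String Int) x => d.modify x 0 (· + 1))
      (l := records) (init := PySem.Dict.empty)).symm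
  have h2 : records.foldl
      (fun (d : PySem.Dict String Int) record => d.modify (pvOrMissing (pvCanonicalizeSplitName (pvExtractRawSplit record))) 0 (· + 1))
      PySem.Dict.empty
      = PySem.Dict.counter ((records.map (fun r => pvOrMissing (pvExtractRawSplit r))).map pvF) := by
    have h2b : List.foldl (fun (d : PySem.Dict String Int) x => d.modify x 0 (· + 1))
        PySem.Dict.empty (records.map (fun r => pvF (pvOrMissing (pvExtractRawSplit r))))
        = records.foldl
            (fun (d : PySem.Dict String Int) r => d.modify (pvF (pvOrMissing (pvExtractRawSplit r))) 0 (· + 1))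
            PySem.Dict.empty :=
      List.foldl_map (f := fun r => pvF (pvOrMissing (pvExtractRawSplit r)))
        (g := fun (d : PySem.Dict String Int) x => d.modify x 0 (· + 1))
        (l := records) (init := PySem.Dict.empty)
    simp only [List.map_map, Function.comp_def]
    rw [PySem.Dict.counter, h2b]
    apply PySem.List.foldl_congr_mem
    intro acc r _
    rw [pvF_orMissing]
  simp only [summarize_original_splits]
  rw [hsplit, h1, h2]

-- B's two passes, rewritten the same way via items_counter
theorem pvB_eq (records : List (List (String × List (String × String)))) :
    summarize_original_splits_alt records =
      ((PySem.Dict.counter (records.map (fun r => pvOrMissing (pvExtractRawSplit r)))).items,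
       (PySem.Dict.counter ((records.map (fun r => pvOrMissing (pvExtractRawSplit r))).map pvF)).items) := by
  have hraw : records.foldl
      (fun (d : PySem.Dict String Int) record =>
        d.insert (pvOrMissing (pvExtractRawSplit record))
          (d.getD (pvOrMissing (pvExtractRawSplit record)) 0 + 1))
      PySem.Dict.empty
      = PySem.Dict.counter (records.map (fun r => pvOrMissing (pvExtractRawSplit r))) := by
    rw [← PySem.Dict.foldl_insert_getD_add_one_eq_counter]
    exact (List.foldl_map (f := fun r => pvOrMissing (pvExtractRawSplit r))
      (g := fun (d : PySem.Dict String Int) x => d.insert x (d.getD x 0 + 1))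
      (l := records) (init := PySem.Dict.empty)).symm
  have hcanon : (PySem.Dict.counter (records.map (fun r => pvOrMissing (pvExtractRawSplit r)))).items.foldl
      (fun (c : PySem.Dict String Int) kv =>
        c.insert (pvOrMissing (pvCanonicalizeSplitName kv.1))
          (c.getD (pvOrMissing (pvCanonicalizeSplitName kv.1)) 0 + kv.2))
      PySem.Dict.empty
      = PySem.Dict.counter ((records.map (fun r => pvOrMissing (pvExtractRawSplit r))).map pvF) := by
    rw [PySem.Dict.items_counter]
    refine Eq.trans (List.foldl_map (f := fun k =>
        (k, (List.count k (records.map (fun r => pvOrMissing (pvExtractRawSplit r))) : Int)))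
      (g := fun (c : PySem.Dict String Int) kv =>
        c.insert (pvOrMissing (pvCanonicalizeSplitName kv.1))
          (c.getD (pvOrMissing (pvCanonicalizeSplitName kv.1)) 0 + kv.2))
      (l := PySem.Set.ofList (records.map (fun r => pvOrMissing (pvExtractRawSplit r))))
      (init := PySem.Dict.empty)) ?_
    exact pv_aggregate_counter (records.map (fun r => pvOrMissing (pvExtractRawSplit r)))
  simp only [summarize_original_splits_alt]
  rw [hraw, hcanon]

-- ===== VERDICT (by name: the statement is the Claim_ definition above) =====
theorem summarize_original_splits_spec : Claim_equal_summarize_original_splits := by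
  intro records _
  unfold Spec_summarize_original_splits
  rw [pvA_eq, pvB_eq]
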